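-- pv_equiv track=rewrite | github.com/hlabs-dev/aoc | 2023/11_ter.py | rawgap
-- ===== SOURCE A (Python) =====
-- def rawgap(li,raw=0,gap=0):
--     total = serie = li[0][1]
--     prev =  li[0][0]
--     prev_gaps = 0
--     for i,cnt in li[1:]:
--         raw += cnt*serie
--         prev_gaps += (i-prev-1)*total
--         gap += cnt*prev_gaps
--         total += cnt
--         serie += total
--         prev = i
--     return raw,gap
-- ===== SOURCE B (Python) =====
-- def rawgap(li, raw=0, gap=0):
--     # Direct pairwise formulation: for each pair j < k, the pair contributes
--     # cnt_j*cnt_k*(k-j) to raw and cnt_j*cnt_k*((pos_k-pos_j)-(k-j)) to gap.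
--     for k in range(1, len(li)):
--         pk, ck = li[k]
--         for j in range(k):
--             pj, cj = li[j]
--             w = cj * ck
--             raw += w * (k - j)
--             gap += w * ((pk - pj) - (k - j))
--     return raw, gap
-- ===== Notes on version B (the rewrite author's own statement) =====
-- stated objective: alternative
-- what changed: Replaces A's single left-to-right pass with running aggregates (total, serie, prev_gaps) by the brute-force double loop that sums each pair's contribution cnt_j*cnt_k*(k-j) to raw and cnt_j*cnt_k*((pos_k-pos_j)-(k-j)) to gap directly.
-- crash fix: On an empty list A raises IndexError (it reads li[0] before the loop) while B's range loop simply runs zero times and returns (raw, gap) unchanged. — e.g. on rawgap([], 3, 5): A raises IndexError, B returns (3, 5)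
import Mathlib
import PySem

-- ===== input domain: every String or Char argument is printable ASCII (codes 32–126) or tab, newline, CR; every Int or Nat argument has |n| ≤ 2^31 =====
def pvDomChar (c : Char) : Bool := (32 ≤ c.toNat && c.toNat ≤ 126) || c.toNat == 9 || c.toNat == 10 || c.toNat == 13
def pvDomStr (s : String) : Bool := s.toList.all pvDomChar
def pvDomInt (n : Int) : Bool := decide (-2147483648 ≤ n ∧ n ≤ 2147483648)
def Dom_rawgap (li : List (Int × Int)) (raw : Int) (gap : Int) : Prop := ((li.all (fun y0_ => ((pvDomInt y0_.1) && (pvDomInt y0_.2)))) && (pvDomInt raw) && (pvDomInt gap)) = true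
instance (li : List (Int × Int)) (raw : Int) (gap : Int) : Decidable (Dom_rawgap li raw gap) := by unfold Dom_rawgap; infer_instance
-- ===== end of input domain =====

-- B re-implements A's single running-sum pass as the naive pairwise double loop; return values proved equal on nonempty lists (A raises IndexError on []).

-- ===== PORT A =====
-- loop state tuple: (raw, gap, total, serie, prev, prev_gaps)
def rawgapStep (st : Int × Int × Int × Int × Int × Int) (e : Int × Int) :
    Int × Int × Int × Int × Int × Int :=
  let raw := st.1 + e.2 * st.2.2.2.1
  let prev_gaps := st.2.2.2.2.2 + (e.1 - st.2.2.2.2.1 - 1) * st.2.2.1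
  let gap := st.2.1 + e.2 * prev_gaps
  let total := st.2.2.1 + e.2
  let serie := st.2.2.2.1 + total
  (raw, gap, total, serie, e.1, prev_gaps)

def rawgap (li : List (Int × Int)) (raw : Int) (gap : Int) : Int × Int :=
  match li with
  | [] => (raw, gap)      -- Python raises IndexError on li[0]; excluded by Pre_rawgap
  | (p0, c0) :: rest =>
    let r := rest.foldl rawgapStep (raw, gap, c0, c0, p0, 0)
    (r.1, r.2.1)

-- ===== PORT B =====
def rawgap_alt (li : List (Int × Int)) (raw : Int) (gap : Int) : Int × Int :=
  (PySem.List.pyRange 1 (li.length : Int) 1).foldl (fun st k =>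
    let pc := PySem.List.pyGetD li k (0, 0)
    (PySem.List.pyRange 0 k 1).foldl (fun st2 j =>
      let pc2 := PySem.List.pyGetD li j (0, 0)
      let w := pc2.2 * pc.2
      (st2.1 + w * (k - j), st2.2 + w * ((pc.1 - pc2.1) - (k - j)))) st) (raw, gap)

-- ===== PRECONDITION & SPEC =====
-- Pre_ excludes exactly the empty list, on which A raises IndexError (li[0]).
def Pre_rawgap (li : List (Int × Int)) (raw : Int) (gap : Int) : Prop := li ≠ []
instance (li : List (Int × Int)) (raw : Int) (gap : Int) : Decidable (Pre_rawgap li raw gap) := by unfold Pre_rawgap; infer_instance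
def pvWitness_rawgap : (List (Int × Int)) × Int × Int := ([(1, 2), (4, 3), (9, 1)], 0, 0)

-- On an empty list A raises IndexError (it reads li[0] before the loop) while B's range loop runs zero times and returns (raw, gap) unchanged.
def Raises_rawgap (li : List (Int × Int)) (raw : Int) (gap : Int) : Prop := li = []
instance (li : List (Int × Int)) (raw : Int) (gap : Int) : Decidable (Raises_rawgap li raw gap) := by unfold Raises_rawgap; infer_instance
def pvRaiseWitness_rawgap : (List (Int × Int)) × Int × Int := ([], 3, 5)
def pvRaiseWitnessOut_rawgap : Int × Int := (3, 5)

def Spec_rawgap (li : List (Int × Int)) (raw : Int) (gap : Int) (out : Int × Int) : Prop := out = rawgap_alt li raw gap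
instance (li : List (Int × Int)) (raw : Int) (gap : Int) (out : Int × Int) : Decidable (Spec_rawgap li raw gap out) := by unfold Spec_rawgap; infer_instance

-- ===== CLAIM (what is proved, stated in full; the proofs are below) =====
def Claim_equal_rawgap : Prop := ∀ (li : List (Int × Int)) (raw : Int) (gap : Int), Dom_rawgap li raw gap → Pre_rawgap li raw gap → Spec_rawgap li raw gap (rawgap li raw gap)
def Claim_raises_rawgap : Prop := (∀ (li : List (Int × Int)) (raw : Int) (gap : Int), Dom_rawgap li raw gap → Raises_rawgap li raw gap → ¬ Pre_rawgap li raw gap) ∧ (Dom_rawgap (pvRaiseWitness_rawgap.1) (pvRaiseWitness_rawgap.2.1) (pvRaiseWitness_rawgap.2.2) ∧ Raises_rawgap (pvRaiseWitness_rawgap.1) (pvRaiseWitness_rawgap.2.1) (pvRaiseWitness_rawgap.2.2) ∧ rawgap_alt (pvRaiseWitness_rawgap.1) (pvRaiseWitness_rawgap.2.1) (pvRaiseWitness_rawgap.2.2) = pvRaiseWitnessOut_rawgap)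

-- ===== LEMMAS AND PROOFS =====
-- spec-side abbreviations (used only by the proofs): cD/pD are the count/position at an
-- index, TS/SS/PGS the running aggregates A maintains, RawS/GapS the pairwise sums B computes.
def cD (li : List (Int × Int)) (j : Nat) : Int := (li.getD j (0, 0)).2
def pD (li : List (Int × Int)) (j : Nat) : Int := (li.getD j (0, 0)).1
def fR (li : List (Int × Int)) (j k : Nat) : Int := cD li j * cD li k * ((k : Int) - (j : Int))
def fG (li : List (Int × Int)) (j k : Nat) : Int :=
  cD li j * cD li k * ((pD li k - pD li j) - ((k : Int) - (j : Int)))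
def TS (li : List (Int × Int)) (m : Nat) : Int := ∑ j ∈ Finset.range m, cD li j
def SS (li : List (Int × Int)) (m : Nat) : Int := ∑ j ∈ Finset.range m, cD li j * ((m : Int) - (j : Int))
def PGS (li : List (Int × Int)) (s : Nat) : Int :=
  ∑ j ∈ Finset.range s, cD li j * ((pD li s - pD li j) - ((s : Int) - (j : Int)))
def RawS (li : List (Int × Int)) (m : Nat) : Int := ∑ k ∈ Finset.range m, ∑ j ∈ Finset.range k, fR li j k
def GapS (li : List (Int × Int)) (m : Nat) : Int := ∑ k ∈ Finset.range m, ∑ j ∈ Finset.range k, fG li j k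

lemma TS_succ (li : List (Int × Int)) (m : Nat) : TS li (m + 1) = TS li m + cD li m := by
  simp [TS, Finset.sum_range_succ]
lemma SS_succ (li : List (Int × Int)) (m : Nat) : SS li (m + 1) = SS li m + TS li (m + 1) := by
  have h : SS li (m + 1)
      = ∑ j ∈ Finset.range (m + 1), (cD li j * ((m : Int) - (j : Int)) + cD li j) := by
    unfold SS; apply Finset.sum_congr rfl; intro j _; push_cast; ring
  rw [h, Finset.sum_add_distrib, Finset.sum_range_succ (f := fun j => cD li j * ((m : Int) - (j : Int)))]
  unfold SS TS; simp
lemma PGS_succ (li : List (Int × Int)) (s : Nat) :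
    PGS li (s + 1) = PGS li s + (pD li (s + 1) - pD li s - 1) * TS li (s + 1) := by
  have h : PGS li (s + 1)
      = ∑ j ∈ Finset.range (s + 1),
          (cD li j * ((pD li s - pD li j) - ((s : Int) - (j : Int)))
            + (pD li (s + 1) - pD li s - 1) * cD li j) := by
    unfold PGS; apply Finset.sum_congr rfl; intro j _; push_cast; ring
  rw [h, Finset.sum_add_distrib,
      Finset.sum_range_succ (f := fun j => cD li j * ((pD li s - pD li j) - ((s : Int) - (j : Int)))),
      ← Finset.mul_sum]
  unfold PGS TS; simp
lemma RawS_succ (li : List (Int × Int)) (m : Nat) :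
    RawS li (m + 1) = RawS li m + cD li m * SS li m := by
  unfold RawS
  rw [Finset.sum_range_succ]
  congr 1
  unfold SS fR
  rw [Finset.mul_sum]
  apply Finset.sum_congr rfl; intro j _; ring
lemma GapS_succ (li : List (Int × Int)) (m : Nat) :
    GapS li (m + 1) = GapS li m + cD li m * PGS li m := by
  unfold GapS
  rw [Finset.sum_range_succ]
  congr 1
  unfold PGS fG
  rw [Finset.mul_sum]
  apply Finset.sum_congr rfl; intro j _; ring

lemma A_inv (hd : Int × Int) (tl : List (Int × Int)) (raw gap : Int) :
    ∀ s : Nat, s ≤ tl.length →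
    (tl.take s).foldl rawgapStep (raw, gap, hd.2, hd.2, hd.1, 0) =
      (raw + RawS (hd :: tl) (s + 1), gap + GapS (hd :: tl) (s + 1), TS (hd :: tl) (s + 1),
       SS (hd :: tl) (s + 1), pD (hd :: tl) s, PGS (hd :: tl) s) := by
  intro s
  induction s with
  | zero =>
    intro _
    simp [RawS, GapS, TS, SS, PGS, cD, pD]
  | succ s ih =>
    intro hs
    have hslt : s < tl.length := by omega
    have hp : pD (hd :: tl) (s + 1) = tl[s].1 := by
      simp [pD, List.getD_eq_getElem?_getD, List.getElem?_eq_getElem hslt]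
    have hc : cD (hd :: tl) (s + 1) = tl[s].2 := by
      simp [cD, List.getD_eq_getElem?_getD, List.getElem?_eq_getElem hslt]
    rw [List.take_add_one, List.getElem?_eq_getElem hslt]
    simp only [Option.toList_some, List.foldl_append, List.foldl_cons, List.foldl_nil]
    rw [ih (by omega)]
    show rawgapStep _ _ = _
    unfold rawgapStep
    simp only [← hp, ← hc]
    rw [show s + 1 + 1 = (s + 1) + 1 from rfl, RawS_succ (hd :: tl) (s + 1), GapS_succ (hd :: tl) (s + 1), SS_succ (hd :: tl) (s + 1), TS_succ (hd :: tl) (s + 1), PGS_succ (hd :: tl) s]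
    simp only [Prod.mk.injEq]
    and_intros <;> first | trivial | ring

lemma B_inner (li : List (Int × Int)) (K : Nat) (m : Nat) (st : Int × Int) :
    (PySem.List.pyRange 0 (m : Int) 1).foldl (fun st2 j =>
      let pc2 := PySem.List.pyGetD li j (0, 0)
      let w := pc2.2 * (PySem.List.pyGetD li (K : Int) (0, 0)).2
      (st2.1 + w * ((K : Int) - j),
       st2.2 + w * (((PySem.List.pyGetD li (K : Int) (0, 0)).1 - pc2.1) - ((K : Int) - j)))) st =
      (st.1 + ∑ j ∈ Finset.range m, fR li j K, st.2 + ∑ j ∈ Finset.range m, fG li j K) := by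
  induction m with
  | zero => simp [PySem.List.pyRange_one_eq_nil]
  | succ m ih =>
    have hsplit : PySem.List.pyRange 0 ((m + 1 : Nat) : Int) 1
        = PySem.List.pyRange 0 (m : Int) 1 ++ [(m : Int)] := by
      push_cast
      exact PySem.List.pyRange_one_succ_right (by positivity)
    rw [hsplit, List.foldl_append, ih]
    simp only [List.foldl_cons, List.foldl_nil]
    simp only [PySem.List.pyGetD_natCast]
    simp only [Prod.mk.injEq, Finset.sum_range_succ]
    constructor <;> · simp [fR, fG, cD, pD]; ring

lemma B_outer (li : List (Int × Int)) (raw gap : Int) (m : Nat) :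
    (PySem.List.pyRange 1 ((m : Int) + 1) 1).foldl (fun st k =>
      let pc := PySem.List.pyGetD li k (0, 0)
      (PySem.List.pyRange 0 k 1).foldl (fun st2 j =>
        let pc2 := PySem.List.pyGetD li j (0, 0)
        let w := pc2.2 * pc.2
        (st2.1 + w * (k - j), st2.2 + w * ((pc.1 - pc2.1) - (k - j)))) st) (raw, gap) =
      (raw + RawS li (m + 1), gap + GapS li (m + 1)) := by
  induction m with
  | zero => simp [PySem.List.pyRange_one_eq_nil, RawS, GapS]
  | succ m ih =>
    have hsplit : PySem.List.pyRange 1 (((m + 1 : Nat) : Int) + 1) 1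
        = PySem.List.pyRange 1 ((m : Int) + 1) 1 ++ [((m + 1 : Nat) : Int)] := by
      push_cast
      exact PySem.List.pyRange_one_succ_right (by omega)
    rw [hsplit, List.foldl_append, ih]
    simp only [List.foldl_cons, List.foldl_nil]
    rw [B_inner li (m + 1) (m + 1)]
    simp only [Prod.mk.injEq]
    constructor <;> · simp only [RawS, GapS, Finset.sum_range_succ]; ring

lemma rawgap_eq (li : List (Int × Int)) (raw gap : Int) (h : li ≠ []) :
    rawgap li raw gap = (raw + RawS li li.length, gap + GapS li li.length) := by
  match li with
  | (p0, c0) :: tl =>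
    have hA := A_inv (p0, c0) tl raw gap tl.length le_rfl
    rw [List.take_length] at hA
    show (let r := tl.foldl rawgapStep (raw, gap, c0, c0, p0, 0); (r.1, r.2.1)) = _
    rw [hA]
    simp

lemma rawgap_alt_eq (li : List (Int × Int)) (raw gap : Int) (h : li ≠ []) :
    rawgap_alt li raw gap = (raw + RawS li li.length, gap + GapS li li.length) := by
  match li with
  | (p0, c0) :: tl =>
    unfold rawgap_alt
    have hlen : ((((p0, c0) :: tl).length : Nat) : Int) = ((tl.length : Nat) : Int) + 1 := by
      simp
    rw [hlen, B_outer ((p0, c0) :: tl) raw gap tl.length]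
    simp

-- ===== VERDICT (by name: the statement is the Claim_ definition above) =====
theorem rawgap_spec : Claim_equal_rawgap := by
  intro li raw gap _ hpre
  unfold Spec_rawgap
  rw [rawgap_eq li raw gap hpre, rawgap_alt_eq li raw gap hpre]

@[simp]
theorem rawgap_raises : Claim_raises_rawgap := by
  unfold Claim_raises_rawgap
  refine ⟨fun li raw gap _ h => ?_, by decide⟩
  simp only [Raises_rawgap] at h
  simp [Pre_rawgap, h]
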